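-- pv_equiv track=rewrite | github.com/mushrhyme/easy-rebate | modules/utils/fill_empty_values_utils.py | _get_last_values_from_page
-- ===== SOURCE A (Python) =====
-- from typing import List, Dict, Any, Optional, Tuple
--
-- def _is_empty_value(value: Any) -> bool:
--     """값이 비어있는지 확인."""
--     if value is None:
--         return True
--     if isinstance(value, str):
--         return not value.strip() or value.strip().lower() == "null"
--     return False
--
-- def _get_field_value(item: Dict[str, Any], field_name: str) -> Optional[str]:
--     """아이템에서 해당 필드값 조회. 비어있으면 None."""
--     value = item.get(field_name)
--     if _is_empty_value(value):
--         return None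
--     return str(value).strip()
--
-- def _get_last_values_from_page(
--     page_json: Dict[str, Any],
--     mgmt_fn: Optional[str],
--     customer_fn: Optional[str],
--     summary_fn: Optional[str],
-- ) -> Tuple[Optional[str], Optional[str], Optional[str]]:
--     """
--     페이지의 마지막 아이템에서 관리번호, 거래처명, 摘要 추출.
--     fn 이 None 인 필드는 추출하지 않음.
--     """
--     items = page_json.get("items", [])
--     if not items:
--         return (None, None, None)
--     last_mgmt = None
--     last_customer = None
--     last_summary = None
--     for item in reversed(items):
--         if mgmt_fn and last_mgmt is None:
--             last_mgmt = _get_field_value(item, mgmt_fn)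
--         if customer_fn and last_customer is None:
--             last_customer = _get_field_value(item, customer_fn)
--         if summary_fn and last_summary is None:
--             last_summary = _get_field_value(item, summary_fn)
--         done_m = last_mgmt is not None or not mgmt_fn
--         done_c = last_customer is not None or not customer_fn
--         done_s = last_summary is not None or not summary_fn
--         if done_m and done_c and done_s:
--             break
--     return (last_mgmt, last_customer, last_summary)
-- ===== SOURCE B (Python) =====
-- from typing import List, Dict, Any, Optional, Tuple
--
-- def _is_empty_value(value: Any) -> bool:
--     if value is None:
--         return True
--     if isinstance(value, str):
--         return not value.strip() or value.strip().lower() == "null"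
--     return False
--
-- def _get_field_value(item: Dict[str, Any], field_name: str) -> Optional[str]:
--     value = item.get(field_name)
--     if _is_empty_value(value):
--         return None
--     return str(value).strip()
--
-- def _find_last_non_empty(items, fn):
--     """Last non-empty value of field fn over items, scanning forward; None if fn is falsy."""
--     if not fn:
--         return None
--     result = None
--     for item in items:
--         v = _get_field_value(item, fn)
--         if v is not None:
--             result = v
--     return result
--
-- def _get_last_values_from_page(
--     page_json: Dict[str, Any],
--     mgmt_fn: Optional[str],
--     customer_fn: Optional[str],
--     summary_fn: Optional[str],
-- ) -> Tuple[Optional[str], Optional[str], Optional[str]]: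
--     items = page_json.get("items", [])
--     return (
--         _find_last_non_empty(items, mgmt_fn),
--         _find_last_non_empty(items, customer_fn),
--         _find_last_non_empty(items, summary_fn),
--     )
-- ===== Notes on version B (the rewrite author's own statement) =====
-- stated objective: simpler
-- what changed: Replaces the fused reverse loop with three-way done-flags and early break by one per-field helper that scans the items forward keeping the last non-empty value, called once per field; the empty-items special case disappears.
import Mathlib
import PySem

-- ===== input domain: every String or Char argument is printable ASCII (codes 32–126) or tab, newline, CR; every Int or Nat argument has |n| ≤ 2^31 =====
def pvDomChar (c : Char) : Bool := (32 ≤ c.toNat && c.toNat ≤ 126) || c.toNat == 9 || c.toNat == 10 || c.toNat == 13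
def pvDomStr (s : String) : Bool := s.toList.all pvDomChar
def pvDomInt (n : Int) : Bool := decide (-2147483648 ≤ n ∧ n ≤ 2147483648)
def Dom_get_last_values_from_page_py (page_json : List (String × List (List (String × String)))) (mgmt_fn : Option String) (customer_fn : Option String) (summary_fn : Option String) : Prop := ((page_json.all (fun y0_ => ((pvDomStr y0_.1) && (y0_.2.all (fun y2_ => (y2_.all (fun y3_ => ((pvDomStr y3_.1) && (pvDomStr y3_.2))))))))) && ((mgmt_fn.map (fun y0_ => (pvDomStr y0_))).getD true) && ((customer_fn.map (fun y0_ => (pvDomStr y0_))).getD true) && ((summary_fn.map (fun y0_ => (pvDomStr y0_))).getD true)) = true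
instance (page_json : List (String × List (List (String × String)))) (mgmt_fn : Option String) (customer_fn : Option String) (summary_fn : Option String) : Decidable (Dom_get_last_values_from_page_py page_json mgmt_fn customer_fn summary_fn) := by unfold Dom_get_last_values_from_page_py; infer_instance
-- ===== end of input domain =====

-- B replaces A's fused reverse loop (three done-flags, early break) by one per-field helper
-- scanning forward for the last non-empty field value, called once per field (objective: simpler).


-- ===== PORT A =====
-- shared module helpers (_is_empty_value, _get_field_value); item values here are always strings
def pvIsEmptyValue (value : Option String) : Bool :=
  match value with
  | none => true
  | some s => PySem.Str.strip s == "" || PySem.Str.lower (PySem.Str.strip s) == "null"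

def pvGetFieldValue (item : List (String × String)) (fieldName : String) : Option String :=
  let value := item.lookup fieldName          -- item.get(field_name): first match of the assoc list
  if pvIsEmptyValue value then none
  else some (PySem.Str.strip (value.getD "")) -- str(value).strip(); value is a string here

-- Python truthiness of an Optional[str]: None and "" are falsy
def pvTruthy (o : Option String) : Bool :=
  match o with
  | none => false
  | some s => !(s == "")

-- the 'for item in reversed(items)' loop with its early break, applied to the reversed list
def pvLoopA (mgmt_fn customer_fn summary_fn : Option String) :
    List (List (String × String)) → Option String → Option String → Option String →
    Option String × Option String × Option String
  | [], lm, lc, ls => (lm, lc, ls)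
  | item :: rest, lm, lc, ls =>
    let lm := if pvTruthy mgmt_fn && lm.isNone then pvGetFieldValue item (mgmt_fn.getD "") else lm
    let lc := if pvTruthy customer_fn && lc.isNone then pvGetFieldValue item (customer_fn.getD "") else lc
    let ls := if pvTruthy summary_fn && ls.isNone then pvGetFieldValue item (summary_fn.getD "") else ls
    if (!lm.isNone || !pvTruthy mgmt_fn) && (!lc.isNone || !pvTruthy customer_fn)
        && (!ls.isNone || !pvTruthy summary_fn) then
      (lm, lc, ls)
    else
      pvLoopA mgmt_fn customer_fn summary_fn rest lm lc ls

def get_last_values_from_page_py (page_json : List (String × List (List (String × String)))) (mgmt_fn : Option String) (customer_fn : Option String) (summary_fn : Option String) : Option String × Option String × Option String :=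
  let items := (page_json.lookup "items").getD []
  if items.isEmpty then (none, none, none)
  else pvLoopA mgmt_fn customer_fn summary_fn items.reverse none none none

-- ===== PORT B =====
def pvFindLastNonEmpty (items : List (List (String × String))) (fn : Option String) : Option String :=
  match fn with
  | none => none
  | some s =>
    if s == "" then none  -- 'if not fn' also catches the empty string
    else items.foldl (fun result item =>
      match pvGetFieldValue item s with
      | none => result
      | some v => some v) none

def get_last_values_from_page_py_alt (page_json : List (String × List (List (String × String)))) (mgmt_fn : Option String) (customer_fn : Option String) (summary_fn : Option String) : Option String × Option String × Option String :=
  let items := (page_json.lookup "items").getD []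
  (pvFindLastNonEmpty items mgmt_fn,
   pvFindLastNonEmpty items customer_fn,
   pvFindLastNonEmpty items summary_fn)

-- ===== PRECONDITION & SPEC =====
def Spec_get_last_values_from_page_py (page_json : List (String × List (List (String × String)))) (mgmt_fn : Option String) (customer_fn : Option String) (summary_fn : Option String) (out : Option String × Option String × Option String) : Prop := out = get_last_values_from_page_py_alt page_json mgmt_fn customer_fn summary_fn
instance (page_json : List (String × List (List (String × String)))) (mgmt_fn : Option String) (customer_fn : Option String) (summary_fn : Option String) (out : Option String × Option String × Option String) : Decidable (Spec_get_last_values_from_page_py page_json mgmt_fn customer_fn summary_fn out) := by unfold Spec_get_last_values_from_page_py; infer_instance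

-- ===== CLAIM (what is proved, stated in full; the proofs are below) =====
def Claim_equal_get_last_values_from_page_py : Prop := ∀ (page_json : List (String × List (List (String × String)))) (mgmt_fn : Option String) (customer_fn : Option String) (summary_fn : Option String), Dom_get_last_values_from_page_py page_json mgmt_fn customer_fn summary_fn → Spec_get_last_values_from_page_py page_json mgmt_fn customer_fn summary_fn (get_last_values_from_page_py page_json mgmt_fn customer_fn summary_fn)

-- ===== LEMMAS AND PROOFS =====

-- characterisation of one accumulator of A's loop over a list l
def pvUpd (fn : Option String) (l : List (List (String × String))) (acc : Option String) : Option String :=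
  if pvTruthy fn && acc.isNone then l.findSome? (fun item => pvGetFieldValue item (fn.getD "")) else acc

theorem pvUpd_nil (fn : Option String) (acc : Option String) : pvUpd fn [] acc = acc := by
  cases acc
  · simp [pvUpd]
  · simp [pvUpd]

theorem pvUpd_stuck (fn : Option String) (l : List (List (String × String))) (acc : Option String)
    (h : (pvTruthy fn && acc.isNone) = false) : pvUpd fn l acc = acc := by
  simp [pvUpd, h]

theorem pvUpd_step (fn : Option String) (it : List (String × String))
    (rest : List (List (String × String))) (acc : Option String) :
    pvUpd fn (it :: rest) acc
      = pvUpd fn rest (if pvTruthy fn && acc.isNone then pvGetFieldValue it (fn.getD "") else acc) := by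
  cases ht : pvTruthy fn <;> cases acc <;>
    simp [pvUpd, ht, List.findSome?_cons] <;>
    cases pvGetFieldValue it (fn.getD "") <;> simp

theorem pvLoopA_eq (m c s : Option String) :
    ∀ (l : List (List (String × String))) (lm lc ls : Option String),
      pvLoopA m c s l lm lc ls = (pvUpd m l lm, pvUpd c l lc, pvUpd s l ls) := by
  intro l
  induction l with
  | nil => intro lm lc ls; simp [pvLoopA, pvUpd_nil]
  | cons it rest ih =>
    intro lm lc ls
    rw [pvLoopA, pvUpd_step, pvUpd_step, pvUpd_step]
    set lm' := if pvTruthy m && lm.isNone then pvGetFieldValue it (m.getD "") else lm with hlm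
    set lc' := if pvTruthy c && lc.isNone then pvGetFieldValue it (c.getD "") else lc with hlc
    set ls' := if pvTruthy s && ls.isNone then pvGetFieldValue it (s.getD "") else ls with hls
    split
    · next hbrk =>
      simp only [Bool.and_eq_true, Bool.or_eq_true, Bool.not_eq_true'] at hbrk
      obtain ⟨⟨h1, h2⟩, h3⟩ := hbrk
      rw [pvUpd_stuck m rest lm' (by rcases h1 with h | h <;> simp [h]),
          pvUpd_stuck c rest lc' (by rcases h2 with h | h <;> simp [h]),
          pvUpd_stuck s rest ls' (by rcases h3 with h | h <;> simp [h])]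
    · exact ih lm' lc' ls'

-- B's forward keep-last fold is the first hit of the reversed list
theorem pvFoldKeepLast (f : List (String × String) → Option String) :
    ∀ (l : List (List (String × String))) (acc : Option String),
      l.foldl (fun result item => match f item with | none => result | some v => some v) acc
        = (l.reverse.findSome? f).or acc := by
  intro l
  induction l with
  | nil => intro acc; simp
  | cons x xs ih =>
    intro acc
    rw [List.foldl_cons, ih, List.reverse_cons, List.findSome?_append, Option.or_assoc]
    congr 1
    simp [List.findSome?_cons]
    cases f x <;> simp

-- the two per-field results agree on every items list
theorem pvComp_eq (items : List (List (String × String))) (fn : Option String) :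
    pvUpd fn items.reverse none = pvFindLastNonEmpty items fn := by
  cases fn with
  | none => simp [pvUpd, pvFindLastNonEmpty, pvTruthy]
  | some s =>
    by_cases hs : s = ""
    · simp [pvUpd, pvFindLastNonEmpty, pvTruthy, hs]
    · rw [pvFindLastNonEmpty]
      rw [if_neg (by simpa using hs), pvFoldKeepLast]
      simp [pvUpd, pvTruthy, hs]

theorem pvFindLastNonEmpty_nil (fn : Option String) : pvFindLastNonEmpty [] fn = none := by
  cases fn <;> simp [pvFindLastNonEmpty]

-- ===== VERDICT (by name: the statement is the Claim_ definition above) =====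
theorem get_last_values_from_page_py_spec : Claim_equal_get_last_values_from_page_py := by
  intro page_json mgmt_fn customer_fn summary_fn _
  unfold Spec_get_last_values_from_page_py get_last_values_from_page_py get_last_values_from_page_py_alt
  set items := (page_json.lookup "items").getD [] with hitems
  by_cases h : items.isEmpty
  · rw [if_pos h]
    rw [List.isEmpty_iff] at h
    simp [h, pvFindLastNonEmpty_nil]
  · rw [if_neg h, pvLoopA_eq, pvComp_eq, pvComp_eq, pvComp_eq]
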